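-- pv_equiv track=rewrite | github.com/baoluchuling/flutter-to-native | scripts/atlas_verify.py | coverage_label
-- ===== SOURCE A (Python) =====
-- def coverage_label(statuses: list[str]) -> str:
--     if not statuses:
--         return "unknown"
--     if all(item == "verified" for item in statuses):
--         return "verified"
--     if any(item == "missing" for item in statuses):
--         return "missing"
--     if any(item in {"partial", "unknown"} for item in statuses):
--         return "partial"
--     return "unknown"
-- ===== SOURCE B (Python) =====
-- _RANK = {"verified": 0, "missing": 3, "partial": 2, "unknown": 2}
-- _LABELS = ("verified", "unknown", "partial", "missing")
--
--
-- def coverage_label(statuses: list[str]) -> str: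
--     # Severity-ranking approach: map each status to a numeric severity
--     # (verified=0, anything unrecognised=1, partial/unknown=2, missing=3),
--     # take the maximum severity in one pass, and decode it back to a label.
--     if not statuses:
--         return "unknown"
--     m = 0
--     for s in statuses:
--         r = _RANK.get(s, 1)
--         if r > m:
--             m = r
--     return _LABELS[m]
-- ===== Notes on version B (the rewrite author's own statement) =====
-- stated objective: alternative
-- what changed: Replaces A's three staged all/any scans by a severity-ranking reduction: each status is mapped to a numeric severity (verified=0, other=1, partial/unknown=2, missing=3), a single pass keeps the maximum, and the label is decoded from that maximum by table lookup.
import Mathlib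
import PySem

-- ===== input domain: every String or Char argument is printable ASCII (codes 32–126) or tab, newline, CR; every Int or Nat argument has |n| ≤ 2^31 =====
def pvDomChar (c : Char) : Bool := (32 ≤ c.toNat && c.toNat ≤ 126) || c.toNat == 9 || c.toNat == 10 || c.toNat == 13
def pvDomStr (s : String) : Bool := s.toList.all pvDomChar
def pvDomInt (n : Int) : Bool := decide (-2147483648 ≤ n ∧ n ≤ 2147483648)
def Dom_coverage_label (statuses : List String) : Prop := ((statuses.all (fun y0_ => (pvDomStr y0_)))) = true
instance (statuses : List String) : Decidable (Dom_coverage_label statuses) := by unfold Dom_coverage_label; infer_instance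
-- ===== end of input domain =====

-- B replaces A's three staged all/any scans with a severity-ranking reduction: one pass keeps the
-- maximum numeric severity (verified=0, other=1, partial/unknown=2, missing=3) and decodes it
-- back to a label by table lookup (objective: alternative).

-- ===== PORT A =====
def coverage_label (statuses : List String) : String :=
  if statuses = [] then "unknown"
  else if statuses.all (fun item => item == "verified") then "verified"
  else if statuses.any (fun item => item == "missing") then "missing"
  else if statuses.any (fun item =>
      PySem.Set.contains (PySem.Set.ofList ["partial", "unknown"]) item) then "partial"
  else "unknown"

-- ===== PORT B =====
-- Source B's module-level _RANK dict and _LABELS tuple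
def pvRankTbl : PySem.Dict String Nat :=
  PySem.Dict.ofList [("verified", 0), ("missing", 3), ("partial", 2), ("unknown", 2)]
def pvLabels : List String := ["verified", "unknown", "partial", "missing"]

def coverage_label_alt (statuses : List String) : String :=
  if statuses = [] then "unknown"
  else
    -- the 'for s in statuses' loop accumulating the maximum severity m
    let m : Nat := statuses.foldl
      (fun m s =>
        let r := PySem.Dict.getD pvRankTbl s 1
        if r > m then r else m) 0
    -- _LABELS[m]: the index is always in range (m ≤ 3), so the lookup never raises;
    -- getD "" only discharges the Option
    (PySem.List.pyGet? pvLabels (m : Int)).getD ""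

-- ===== PRECONDITION & SPEC =====
def Spec_coverage_label (statuses : List String) (out : String) : Prop := out = coverage_label_alt statuses
instance (statuses : List String) (out : String) : Decidable (Spec_coverage_label statuses out) := by unfold Spec_coverage_label; infer_instance

-- ===== CLAIM (what is proved, stated in full; the proofs are below) =====
def Claim_equal_coverage_label : Prop := ∀ (statuses : List String), Dom_coverage_label statuses → Spec_coverage_label statuses (coverage_label statuses)

-- ===== LEMMAS AND PROOFS =====

-- the per-element severity, as B's loop body computes it
def pvRank (s : String) : Nat := PySem.Dict.getD pvRankTbl s 1

theorem pvRank_char (s : String) :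
    pvRank s = if s = "missing" then 3 else if s = "partial" ∨ s = "unknown" then 2
               else if s = "verified" then 0 else 1 := by
  have htbl : pvRankTbl =
      PySem.Dict.mk [("verified", 0), ("missing", 3), ("partial", 2), ("unknown", 2)] := by decide
  unfold pvRank
  rw [htbl]
  simp only [PySem.Dict.getD, PySem.Dict.get?_mk_cons]
  split_ifs with a b c <;> simp_all [PySem.Dict.get?, List.find?]
  all_goals rcases ‹s = "partial" ∨ s = "unknown"› with rfl | rfl <;> simp_all

theorem pvRank_le_three (s : String) : pvRank s ≤ 3 := by
  rw [pvRank_char]; split_ifs <;> omega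

theorem pvRank_eq_zero (s : String) : pvRank s = 0 ↔ s = "verified" := by
  rw [pvRank_char]
  split_ifs with a b c <;> simp_all
  rcases b with rfl | rfl <;> simp

theorem pvRank_eq_two (s : String) : pvRank s = 2 ↔ s = "partial" ∨ s = "unknown" := by
  rw [pvRank_char]; split_ifs <;> simp_all

theorem pvRank_eq_three (s : String) : pvRank s = 3 ↔ s = "missing" := by
  rw [pvRank_char]; split_ifs <;> simp_all

-- B's fold is the foldl of max over the ranks
theorem pvFold_eq (l : List String) (a : Nat) :
    l.foldl (fun m s => let r := PySem.Dict.getD pvRankTbl s 1; if r > m then r else m) a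
      = (l.map pvRank).foldl max a := by
  induction l generalizing a with
  | nil => rfl
  | cons x t ih =>
      simp only [List.foldl_cons, List.map_cons, ih]
      congr 1
      show (if pvRank x > a then pvRank x else a) = max a (pvRank x)
      rcases Nat.lt_or_ge a (pvRank x) with h | h
      · rw [if_pos h, Nat.max_eq_right (le_of_lt h)]
      · rw [if_neg (not_lt.2 h), Nat.max_eq_left h]

theorem pv_le_foldl_max (l : List Nat) (a : Nat) : a ≤ l.foldl max a := by
  induction l generalizing a with
  | nil => simp
  | cons x t ih => exact le_trans (Nat.le_max_left a x) (ih _)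

theorem pv_mem_le_foldl_max (l : List Nat) (a x : Nat) (hx : x ∈ l) : x ≤ l.foldl max a := by
  induction l generalizing a with
  | nil => cases hx
  | cons y t ih =>
      rcases List.mem_cons.1 hx with rfl | h
      · exact le_trans (Nat.le_max_right a x) (pv_le_foldl_max t _)
      · exact ih _ h

theorem pv_foldl_max_attained (l : List Nat) (a : Nat) :
    l.foldl max a = a ∨ l.foldl max a ∈ l := by
  induction l generalizing a with
  | nil => left; rfl
  | cons x t ih =>
      rw [List.foldl_cons]
      rcases ih (max a x) with h | h
      · by_cases hax : x ≤ a
        · left; rw [h, Nat.max_eq_left hax]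
        · right; rw [h, Nat.max_eq_right ((not_le.1 hax).le)]
          exact List.mem_cons_self
      · right; exact List.mem_cons_of_mem _ h

-- ===== VERDICT (by name: the statement is the Claim_ definition above) =====
theorem coverage_label_spec : Claim_equal_coverage_label := by
  intro statuses _
  unfold Spec_coverage_label coverage_label coverage_label_alt
  by_cases hnil : statuses = []
  · simp [hnil]
  · simp only [hnil, if_false]
    set M : Nat := statuses.foldl
      (fun m s => let r := PySem.Dict.getD pvRankTbl s 1; if r > m then r else m) 0 with hM
    rw [pvFold_eq] at hM
    -- every rank is ≤ M
    have hub : ∀ s ∈ statuses, pvRank s ≤ M := by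
      intro s hs
      rw [hM]
      exact pv_mem_le_foldl_max _ _ _ (List.mem_map_of_mem hs)
    -- M is attained (or M = 0)
    have hatt : M = 0 ∨ ∃ s ∈ statuses, pvRank s = M := by
      rcases pv_foldl_max_attained (statuses.map pvRank) 0 with h | h
      · left; rw [hM, h]
      · right
        rw [hM]
        rcases List.mem_map.1 h with ⟨s, hs, he⟩
        exact ⟨s, hs, he⟩
    have hM3 : M ≤ 3 := by
      rcases hatt with h | ⟨s, _, hs⟩
      · omega
      · rw [← hs]; exact pvRank_le_three s
    -- characterisations of A's three tests in terms of M
    have hall : (statuses.all (fun item => item == "verified")) = true ↔ M = 0 := by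
      constructor
      · intro h
        rcases hatt with h0 | ⟨s, hs, hr⟩
        · exact h0
        · have hv := List.all_eq_true.1 h s hs
          simp only [beq_iff_eq] at hv
          rw [← hr, pvRank_eq_zero]
          exact hv
      · intro h0
        apply List.all_eq_true.2
        intro s hs
        have h1 := hub s hs
        rw [h0, Nat.le_zero, pvRank_eq_zero] at h1
        simp [h1]
    have hmiss : (statuses.any (fun item => item == "missing")) = true ↔ M = 3 := by
      constructor
      · intro h
        rcases List.any_eq_true.1 h with ⟨s, hs, he⟩
        simp only [beq_iff_eq] at he
        have h1 := hub s hs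
        rw [(pvRank_eq_three s).2 he] at h1
        omega
      · intro h3
        rcases hatt with h0 | ⟨s, hs, hr⟩
        · omega
        · apply List.any_eq_true.2
          refine ⟨s, hs, ?_⟩
          rw [h3, pvRank_eq_three] at hr
          simp [hr]
    have hpart : (statuses.any (fun item =>
        PySem.Set.contains (PySem.Set.ofList ["partial", "unknown"]) item)) = true ↔
        (∃ s ∈ statuses, pvRank s = 2) := by
      constructor
      · intro h
        rcases List.any_eq_true.1 h with ⟨s, hs, he⟩
        refine ⟨s, hs, ?_⟩
        have hmem : s ∈ PySem.Set.ofList ["partial", "unknown"] := by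
          simpa [PySem.Set.contains_iff] using he
        rw [PySem.Set.mem_ofList] at hmem
        simp only [List.mem_cons, List.not_mem_nil, or_false] at hmem
        rw [pvRank_eq_two]
        exact hmem
      · rintro ⟨s, hs, hr⟩
        apply List.any_eq_true.2
        refine ⟨s, hs, ?_⟩
        rw [pvRank_eq_two] at hr
        rw [PySem.Set.contains_iff, PySem.Set.mem_ofList]
        rcases hr with h' | h' <;> simp [h']
    -- case on the value of M
    interval_cases M
    · -- M = 0: all verified
      rw [if_pos (hall.2 rfl)]
      rfl
    · -- M = 1: none of the scans fire
      have h1 : ¬ (statuses.all (fun item => item == "verified")) = true := by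
        rw [hall]; omega
      have h2 : ¬ (statuses.any (fun item => item == "missing")) = true := by
        rw [hmiss]; omega
      have h3 : ¬ (statuses.any (fun item =>
          PySem.Set.contains (PySem.Set.ofList ["partial", "unknown"]) item)) = true := by
        rw [hpart]
        rintro ⟨s, hs, hr⟩
        have := hub s hs
        omega
      rw [if_neg h1, if_neg h2, if_neg h3]
      rfl
    · -- M = 2: partial
      have h1 : ¬ (statuses.all (fun item => item == "verified")) = true := by
        rw [hall]; omega
      have h2 : ¬ (statuses.any (fun item => item == "missing")) = true := by
        rw [hmiss]; omega
      have h3 : (statuses.any (fun item =>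
          PySem.Set.contains (PySem.Set.ofList ["partial", "unknown"]) item)) = true := by
        rw [hpart]
        rcases hatt with h0 | h
        · omega
        · exact h
      rw [if_neg h1, if_neg h2, if_pos h3]
      rfl
    · -- M = 3: missing
      have h1 : ¬ (statuses.all (fun item => item == "verified")) = true := by
        rw [hall]; omega
      have h2 : (statuses.any (fun item => item == "missing")) = true := hmiss.2 rfl
      rw [if_neg h1, if_pos h2]
      rfl
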